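-- pv_equiv track=rewrite | github.com/akashdeep3194/Scaler | d77-d79 DP/Minimum Falling Path Sum II.py | minArr
-- ===== SOURCE A (Python) =====
-- def minArr(A):
--     min = sec_min = 2**32-1
--     for ele in A:
--         if ele < min:
--             sec_min = min
--             min = ele
--         elif ele >= min and ele < sec_min:
--             sec_min = ele
--     ans = []
--     for ele in A:
--         if min == ele:
--             ans.append(sec_min)
--         else:
--             ans.append(min)
--     return ans
-- ===== SOURCE B (Python) =====
-- def minArr(A):
--     s = sorted(A)
--     sec = s[1] if len(s) >= 2 else 2**32 - 1
--     return [sec if x == s[0] else s[0] for x in A]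
-- ===== Notes on version B (the rewrite author's own statement) =====
-- stated objective: simpler
-- what changed: Replaces A's manual one-pass min/second-min state machine and append loop with sorting once and reading the two smallest elements off the sorted list, then a single comprehension.
import Mathlib
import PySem

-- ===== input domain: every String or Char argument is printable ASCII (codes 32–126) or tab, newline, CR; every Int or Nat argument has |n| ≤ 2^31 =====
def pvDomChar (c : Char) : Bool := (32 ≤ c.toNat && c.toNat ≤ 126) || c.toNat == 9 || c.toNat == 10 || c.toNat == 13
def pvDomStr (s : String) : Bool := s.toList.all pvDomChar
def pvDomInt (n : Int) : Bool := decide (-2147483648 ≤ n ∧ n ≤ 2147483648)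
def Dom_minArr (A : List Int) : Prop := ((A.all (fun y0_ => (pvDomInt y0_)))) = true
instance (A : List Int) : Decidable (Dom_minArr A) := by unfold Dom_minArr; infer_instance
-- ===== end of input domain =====

-- B replaces A's manual min/second-min tracking loop by sort-then-map (objective: simpler).

-- ===== PORT A =====
-- the body of A's first for-loop, updating the (min, sec_min) pair
def minArrStep (st : Int × Int) (ele : Int) : Int × Int :=
  if ele < st.1 then (ele, st.1)
  else if st.1 ≤ ele ∧ ele < st.2 then (st.1, ele)
  else st

def minArr (A : List Int) : List Int :=
  let st := A.foldl minArrStep (4294967295, 4294967295)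
  A.foldl (fun ans ele => ans ++ [if st.1 = ele then st.2 else st.1]) []

-- ===== PORT B =====
-- s[0] is only read when A is nonempty and s[1] only when len(s) >= 2, so the
-- guarded getD accesses are exact for Python's s[0] / s[1] there.
def minArr_alt (A : List Int) : List Int :=
  let s := PySem.List.sorted A (fun x => x) false
  let sec := if 2 ≤ s.length then s.getD 1 0 else 4294967295
  A.map (fun x => if x = s.getD 0 0 then sec else s.getD 0 0)

-- ===== PRECONDITION & SPEC =====
def Spec_minArr (A : List Int) (out : List Int) : Prop := out = minArr_alt A
instance (A : List Int) (out : List Int) : Decidable (Spec_minArr A out) := by unfold Spec_minArr; infer_instance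

-- ===== CLAIM (what is proved, stated in full; the proofs are below) =====
def Claim_equal_minArr : Prop := ∀ (A : List Int), Dom_minArr A → Spec_minArr A (minArr A)

-- ===== LEMMAS AND PROOFS =====

-- (m, s) are the two smallest elements (with multiplicity) of the list L
def TwoMin (L : List Int) (m s : Int) : Prop :=
  m ≤ s ∧ ∃ R : Multiset Int, (L : Multiset Int) = m ::ₘ s ::ₘ R ∧ ∀ x ∈ R, s ≤ x

theorem twoMin_unique {L : List Int} {m s m' s' : Int}
    (h1 : TwoMin L m s) (h2 : TwoMin L m' s') : m = m' ∧ s = s' := by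
  obtain ⟨hms, R, hR, hRle⟩ := h1
  obtain ⟨hms', R', hR', hRle'⟩ := h2
  have hmem : m' ∈ (L : Multiset Int) := by rw [hR']; simp
  have hmem2 : m ∈ (L : Multiset Int) := by rw [hR]; simp
  have hlem : ∀ x ∈ (L : Multiset Int), m ≤ x := by
    intro x hx
    rw [hR] at hx
    rcases Multiset.mem_cons.1 hx with h | hx
    · omega
    rcases Multiset.mem_cons.1 hx with h | hx
    · omega
    · have := hRle x hx; omega
  have hlem' : ∀ x ∈ (L : Multiset Int), m' ≤ x := by
    intro x hx
    rw [hR'] at hx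
    rcases Multiset.mem_cons.1 hx with h | hx
    · omega
    rcases Multiset.mem_cons.1 hx with h | hx
    · omega
    · have := hRle' x hx; omega
  have hmm : m = m' := le_antisymm (hlem m' hmem) (hlem' m hmem2)
  subst hmm
  have hcancel : (s ::ₘ R) = (s' ::ₘ R') := by
    have h0 : m ::ₘ s ::ₘ R = m ::ₘ s' ::ₘ R' := by rw [← hR, ← hR']
    exact (Multiset.cons_inj_right m).1 h0
  have hsm : s' ∈ s ::ₘ R := by rw [hcancel]; simp
  have hsm2 : s ∈ s' ::ₘ R' := by rw [← hcancel]; simp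
  have h1 : s ≤ s' := by
    rcases Multiset.mem_cons.1 hsm with h | h
    · omega
    · exact hRle _ h
  have h2 : s' ≤ s := by
    rcases Multiset.mem_cons.1 hsm2 with h | h
    · omega
    · exact hRle' _ h
  exact ⟨rfl, le_antisymm h1 h2⟩

-- the second-min q of a multiset containing m' ≤ s' satisfies q ≤ s'
theorem qle {m' s' p q : Int} {M R : Multiset Int}
    (hms : m' ≤ s') (_hpq : p ≤ q)
    (hEq : (m' ::ₘ s' ::ₘ M) = p ::ₘ q ::ₘ R)
    (hR : ∀ x ∈ R, q ≤ x) : q ≤ s' := by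
  by_contra hlt
  replace hlt : s' < q := by omega
  have hnotin : ∀ x, x ∈ q ::ₘ R → s' < x := by
    intro x hx
    rcases Multiset.mem_cons.1 hx with h | h
    · omega
    · have := hR x h; omega
  have hm'eq : m' = p := by
    have : m' ∈ p ::ₘ q ::ₘ R := by rw [← hEq]; simp
    rcases Multiset.mem_cons.1 this with h | h
    · exact h
    · have := hnotin _ h; omega
  have hs'eq : s' = p := by
    have : s' ∈ p ::ₘ q ::ₘ R := by rw [← hEq]; simp
    rcases Multiset.mem_cons.1 this with h | h
    · exact h
    · have := hnotin _ h; omega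
  -- now p occurs at least twice on the left but exactly once on the right
  have hcount : Multiset.count p (m' ::ₘ s' ::ₘ M) = Multiset.count p (p ::ₘ q ::ₘ R) := by
    rw [hEq]
  have hl : 2 ≤ Multiset.count p (m' ::ₘ s' ::ₘ M) := by
    rw [Multiset.count_cons, Multiset.count_cons]
    simp [hm'eq, hs'eq]
  have hr0 : Multiset.count p (q ::ₘ R) = 0 := by
    rw [Multiset.count_eq_zero]
    intro hmem
    have := hnotin p hmem
    omega
  have hr : Multiset.count p (p ::ₘ q ::ₘ R) = 1 := by
    rw [Multiset.count_cons_self, hr0]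
  omega

-- one step of A's loop, in min/max closed form (valid whenever m ≤ s)
theorem step_closed (m s x : Int) (h : m ≤ s) :
    minArrStep (m, s) x = (min m x, min s (max m x)) := by
  unfold minArrStep
  simp only
  split_ifs with h1 h2 <;>
    refine Prod.ext ?_ ?_ <;> simp [min_def, max_def] <;> omega

theorem fold_twoMin : ∀ (A : List Int) (m s : Int), m ≤ s →
    TwoMin (m :: s :: A) (A.foldl minArrStep (m, s)).1 (A.foldl minArrStep (m, s)).2 := by
  intro A
  induction A with
  | nil =>
    intro m s h
    exact ⟨h, 0, rfl, by simp⟩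
  | cons x A ih =>
    intro m s h
    have hstep := step_closed m s x h
    have hms' : min m x ≤ min s (max m x) := by
      simp [min_def, max_def]; omega
    have hIH := ih (min m x) (min s (max m x)) hms'
    obtain ⟨hpq, R, hR, hRle⟩ := hIH
    set p := (A.foldl minArrStep (min m x, min s (max m x))).1 with hp
    set q := (A.foldl minArrStep (min m x, min s (max m x))).2 with hq
    have hfold : (x :: A).foldl minArrStep (m, s) = A.foldl minArrStep (min m x, min s (max m x)) := by
      simp [List.foldl_cons, hstep]
    rw [hfold]
    -- multiset of the extended list = d ::ₘ multiset of (m' :: s' :: A), d = max s x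
    have hmulti : ((m :: s :: x :: A : List Int) : Multiset Int)
        = (max s x) ::ₘ ((min m x :: min s (max m x) :: A : List Int) : Multiset Int) := by
      have hthree : (m ::ₘ s ::ₘ x ::ₘ (↑A : Multiset Int))
          = (max s x) ::ₘ (min m x) ::ₘ (min s (max m x)) ::ₘ (↑A : Multiset Int) := by
        rcases lt_or_ge x m with hxm | hmx
        · have e1 : min m x = x := by omega
          have e2 : max m x = m := by omega
          have e3 : min s m = m := by omega
          have e4 : max s x = s := by omega
          rw [e1, e2, e3, e4]
          -- m ::ₘ s ::ₘ x ::ₘ A = s ::ₘ x ::ₘ m ::ₘ A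
          rw [Multiset.cons_swap m s, Multiset.cons_swap m x]
        · rcases lt_or_ge x s with hxs | hsx
          · have e1 : min m x = m := by omega
            have e2 : max m x = x := by omega
            have e3 : min s x = x := by omega
            have e4 : max s x = s := by omega
            rw [e1, e2, e3, e4]
            -- m ::ₘ s ::ₘ x ::ₘ A = s ::ₘ m ::ₘ x ::ₘ A
            rw [Multiset.cons_swap m s]
          · have e1 : min m x = m := by omega
            have e2 : max m x = x := by omega
            have e3 : min s x = s := by omega
            have e4 : max s x = x := by omega
            rw [e1, e2, e3, e4]
            -- m ::ₘ s ::ₘ x ::ₘ A = x ::ₘ m ::ₘ s ::ₘ A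
            rw [Multiset.cons_swap s x, Multiset.cons_swap m x]
      simpa using hthree
    refine ⟨hpq, (max s x) ::ₘ R, ?_, ?_⟩
    · rw [hmulti, hR]
      rw [Multiset.cons_swap (max s x) p, Multiset.cons_swap (max s x) q]
    · intro y hy
      rcases Multiset.mem_cons.1 hy with h' | h'
      · subst h'
        have hR' : (min m x) ::ₘ (min s (max m x)) ::ₘ (↑A : Multiset Int) = p ::ₘ q ::ₘ R := hR
        have hqs' : q ≤ min s (max m x) := qle hms' hpq hR' hRle
        have h1 : min s (max m x) ≤ s := min_le_left _ _
        have h2 : s ≤ max s x := le_max_left s x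
        omega
      · exact hRle _ h'

-- B's sorted-head / sorted-second values also satisfy TwoMin on (S0 :: S0 :: A)
theorem sorted_twoMin (A : List Int) (hA : A ≠ [])
    (hle : ∀ a ∈ A, a ≤ (4294967295 : Int)) :
    TwoMin (4294967295 :: 4294967295 :: A)
      ((PySem.List.sorted A (fun x => x) false).getD 0 0)
      (if 2 ≤ (PySem.List.sorted A (fun x => x) false).length
        then (PySem.List.sorted A (fun x => x) false).getD 1 0 else 4294967295) := by
  have hperm : (PySem.List.sorted A (fun x => x) false).Perm A := PySem.List.sorted_perm A _ _
  have hpair : (PySem.List.sorted A (fun x => x) false).Pairwise (fun a b => a ≤ b) := by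
    have := PySem.List.sorted_pairwise A (fun x : Int => x)
    simpa using this
  have hleS : ∀ a ∈ PySem.List.sorted A (fun x => x) false, a ≤ (4294967295 : Int) := by
    intro a ha
    exact hle a (hperm.mem_iff.1 ha)
  rcases hs : PySem.List.sorted A (fun x => x) false with _ | ⟨a, t⟩
  · exfalso
    rw [hs] at hperm
    exact hA hperm.symm.eq_nil
  rw [hs] at hperm hpair hleS
  rcases t with _ | ⟨b, t'⟩
  · -- singleton: A ~ [a]
    have hAeq : (↑A : Multiset Int) = ↑([a] : List Int) := by
      exact Multiset.coe_eq_coe.2 hperm.symm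
    have hgd0 : ([a] : List Int).getD 0 0 = a := rfl
    simp only [List.length_cons, List.length_nil]
    rw [if_neg (by omega), hgd0]
    refine ⟨hleS a (by simp), {(4294967295 : Int)}, ?_, ?_⟩
    · show ((4294967295 : Int) ::ₘ (4294967295 : Int) ::ₘ (↑A : Multiset Int))
        = a ::ₘ (4294967295 : Int) ::ₘ {(4294967295 : Int)}
      have hA1 : (↑A : Multiset Int) = a ::ₘ 0 := hAeq.trans rfl
      rw [hA1]
      have hz : ({(4294967295 : Int)} : Multiset Int) = (4294967295 : Int) ::ₘ 0 := rfl
      rw [hz]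
      simp only [← Multiset.singleton_add]
      abel
    · intro x hx
      have : x = (4294967295 : Int) := by simpa using hx
      subst this
      rfl
  · -- length ≥ 2: head a, second b
    have hgd0 : (a :: b :: t' : List Int).getD 0 0 = a := rfl
    have hgd1 : (a :: b :: t' : List Int).getD 1 0 = b := rfl
    simp only [List.length_cons]
    rw [if_pos (by omega), hgd0, hgd1]
    have hab : a ≤ b := by
      rcases List.pairwise_cons.1 hpair with ⟨h1, _⟩
      exact h1 b (by simp)
    have hbt : ∀ y ∈ t', b ≤ y := by
      rcases List.pairwise_cons.1 hpair with ⟨_, h2⟩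
      rcases List.pairwise_cons.1 h2 with ⟨h3, _⟩
      exact h3
    have hAeq : (↑A : Multiset Int) = ↑(a :: b :: t') := Multiset.coe_eq_coe.2 hperm.symm
    refine ⟨hab, (↑t' : Multiset Int) + ↑([4294967295, 4294967295] : List Int), ?_, ?_⟩
    · show ((4294967295 : Int) ::ₘ (4294967295 : Int) ::ₘ (↑A : Multiset Int))
        = a ::ₘ b ::ₘ ((↑t' : Multiset Int) + ↑([4294967295, 4294967295] : List Int))
      have hA2 : (↑A : Multiset Int) = a ::ₘ b ::ₘ (↑t' : Multiset Int) := hAeq.trans rfl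
      have h2 : (↑([4294967295, 4294967295] : List Int) : Multiset Int)
          = (4294967295 : Int) ::ₘ (4294967295 : Int) ::ₘ 0 := rfl
      rw [hA2, h2]
      simp only [← Multiset.singleton_add]
      abel
    · intro x hx
      rcases Multiset.mem_add.1 hx with h | h
      · exact hbt x (by simpa using h)
      · have hb : b ≤ 4294967295 := hleS b (by simp)
        simp at h
        rcases h with h | h <;> omega

-- A's append-building second loop is a map
theorem foldl_append_map (f : Int → Int) :
    ∀ (L : List Int) (acc : List Int),
      L.foldl (fun ans ele => ans ++ [f ele]) acc = acc ++ L.map f := by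
  intro L
  induction L with
  | nil => intro acc; simp
  | cons x L ih => intro acc; simp [List.foldl_cons, ih]

-- ===== VERDICT (by name: the statement is the Claim_ definition above) =====
theorem minArr_spec : Claim_equal_minArr := by
  intro A hDom
  unfold Spec_minArr
  rcases hA : A with _ | ⟨x, xs⟩
  · rfl
  rw [← hA]
  have hAne : A ≠ [] := by rw [hA]; simp
  have hle : ∀ a ∈ A, a ≤ (4294967295 : Int) := by
    intro a ha
    have := (List.all_eq_true.1 hDom) a ha
    simp [pvDomInt] at this
    omega
  have hF := fold_twoMin A 4294967295 4294967295 le_rfl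
  have hG := sorted_twoMin A hAne hle
  have huniq := twoMin_unique hF hG
  unfold minArr minArr_alt
  simp only
  rw [foldl_append_map]
  simp only [List.nil_append]
  apply List.map_congr_left
  intro y _
  rcases huniq with ⟨h1, h2⟩
  rw [h1, h2]
  by_cases h : y = (PySem.List.sorted A (fun x => x) false).getD 0 0
  · rw [if_pos h, if_pos h.symm]
  · rw [if_neg h, if_neg (fun hh => h hh.symm)]
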